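-- pv_equiv track=rewrite | github.com/esther-soyoung/Coding-Challenge | Hash/spy.py | solution
-- ===== SOURCE A (Python) =====
-- from collections import defaultdict
--
-- def solution(clothes):
--     dic = defaultdict(list)
--     for c in clothes:
--         dic[c[1]].append(c[0])
--     answer = 0
--     temp1 = 1
--     temp2 = 0
--     for key, val in dic.items():
--         j = len(val) * (temp1 + temp2)
--         answer += j
--         temp1 = temp1 + temp2
--         temp2 = j
--     return answer
-- ===== SOURCE B (Python) =====
-- from collections import Counter
--
-- def solution(clothes):
--     counts = Counter(c[1] for c in clothes)
--     answer = 1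
--     for n in counts.values():
--         answer *= n + 1
--     return answer - 1
-- ===== Notes on version B (the rewrite author's own statement) =====
-- stated objective: simpler
-- what changed: B counts occurrences per category with a Counter and multiplies (count+1) into a single accumulator, replacing A's grouping-into-lists dict and its three-variable additive recurrence (answer/temp1/temp2) with the direct product(count+1)-1 closed form.
import Mathlib
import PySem

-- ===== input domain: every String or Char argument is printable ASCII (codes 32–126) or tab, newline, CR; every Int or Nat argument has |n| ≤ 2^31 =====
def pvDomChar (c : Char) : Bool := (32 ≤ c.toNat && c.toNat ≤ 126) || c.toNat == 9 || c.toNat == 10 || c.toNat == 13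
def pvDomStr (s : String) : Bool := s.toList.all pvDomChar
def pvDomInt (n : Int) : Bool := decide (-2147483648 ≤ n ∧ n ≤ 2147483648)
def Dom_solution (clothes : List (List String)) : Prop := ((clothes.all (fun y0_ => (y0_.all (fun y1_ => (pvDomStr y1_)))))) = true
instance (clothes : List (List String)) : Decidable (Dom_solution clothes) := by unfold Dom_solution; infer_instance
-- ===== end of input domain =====

-- B differs from A in algorithm (direct product of (count+1) over a Counter, vs A's
-- list-grouping dict and additive three-variable recurrence); same return value.

-- ===== PORT A =====
-- dic[c[1]].append(c[0]) on a defaultdict(list) = modify (c[1]) [] (· ++ [c[0]]);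
-- c[1] / c[0] via pyGet? (none = IndexError, excluded by Pre_; .getD "" is dead inside Pre_).
def solution (clothes : List (List String)) : Int :=
  let dic := clothes.foldl
    (fun d c => d.modify ((PySem.List.pyGet? c 1).getD "") []
                  (· ++ [(PySem.List.pyGet? c 0).getD ""]))
    PySem.Dict.empty
  let st := dic.items.foldl
    (fun st p =>
      let j : Int := (p.2.length : Int) * (st.2.1 + st.2.2)
      (st.1 + j, st.2.1 + st.2.2, j))
    ((0 : Int), (1 : Int), (0 : Int))
  st.1

-- ===== PORT B =====
-- Counter(c[1] for c in clothes), then answer *= n + 1 over its values, answer - 1.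
def solution_alt (clothes : List (List String)) : Int :=
  let counts := PySem.Dict.counter (clothes.map (fun c => (PySem.List.pyGet? c 1).getD ""))
  (counts.values.foldl (fun a n => a * (n + 1)) 1) - 1

-- ===== PRECONDITION & SPEC =====
-- A (and B) raise IndexError on c[1] / c[0] when an inner list has fewer than 2 elements.
def Pre_solution (clothes : List (List String)) : Prop :=
  ∀ c ∈ clothes, 2 ≤ c.length
instance (clothes : List (List String)) : Decidable (Pre_solution clothes) := by
  unfold Pre_solution; infer_instance
def pvWitness_solution : List (List String) :=
  [["hat", "head"], ["cap", "head"], ["shoe", "feet"]]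
def Spec_solution (clothes : List (List String)) (out : Int) : Prop := out = solution_alt clothes
instance (clothes : List (List String)) (out : Int) : Decidable (Spec_solution clothes out) := by unfold Spec_solution; infer_instance

-- ===== CLAIM (what is proved, stated in full; the proofs are below) =====
def Claim_equal_solution : Prop := ∀ (clothes : List (List String)), Dom_solution clothes → Pre_solution clothes → Spec_solution clothes (solution clothes)

-- ===== LEMMAS AND PROOFS =====

-- pull the product accumulator out of a foldl
lemma foldl_mul_acc {α : Type} (f : α → Int) (l : List α) (a : Int) :
    l.foldl (fun b x => b * f x) a = a * l.foldl (fun b x => b * f x) 1 := by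
  induction l generalizing a with
  | nil => simp
  | cons x l ih =>
    simp only [List.foldl_cons]
    rw [ih (a * f x), ih (1 * f x)]
    ring

-- A's additive three-variable loop computes product(len+1) - 1
lemma loopA_eq (l : List (String × List String)) (ans t1 t2 : Int) :
    (l.foldl (fun st p =>
        let j : Int := (p.2.length : Int) * (st.2.1 + st.2.2)
        (st.1 + j, st.2.1 + st.2.2, j)) (ans, t1, t2)).1
      = ans + (t1 + t2) * (l.foldl (fun a p => a * ((p.2.length : Int) + 1)) 1 - 1) := by
  induction l generalizing ans t1 t2 with
  | nil => simp
  | cons p l ih =>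
    simp only [List.foldl_cons]
    rw [ih, foldl_mul_acc (fun p => ((p.2.length : Int) + 1)) l (1 * ((p.2.length : Int) + 1))]
    ring

theorem solution_spec : Claim_equal_solution := by
  intro clothes _ _
  unfold Spec_solution solution solution_alt
  dsimp only []
  set key : List String → String := fun c => (PySem.List.pyGet? c 1).getD "" with hkey
  set cats : List String := clothes.map key with hcats
  -- A's dict build as a fold over (category, name) pairs
  have hdic :
      clothes.foldl
        (fun d c => d.modify (key c) [] (· ++ [(PySem.List.pyGet? c 0).getD ""]))
        PySem.Dict.empty
      = (clothes.map (fun c => (key c, (PySem.List.pyGet? c 0).getD ""))).foldl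
          (fun d p => d.modify p.1 [] (· ++ [p.2])) PySem.Dict.empty := by
    rw [List.foldl_map]
  set pairs := clothes.map (fun c => (key c, (PySem.List.pyGet? c 0).getD "")) with hpairs
  set dic := pairs.foldl (fun d p => d.modify p.1 [] (· ++ [p.2])) PySem.Dict.empty with hdicdef
  rw [hdic]
  have hnodup : dic.keys.Nodup := by
    rw [hdicdef]
    exact PySem.Dict.nodup_keys_foldl_modify_key pairs Prod.fst [] _ _
      (by simp [PySem.Dict.keys_empty])
  have hkeys : dic.keys = PySem.Set.ofList cats := by
    rw [hdicdef, PySem.Dict.keys_foldl_modify_key]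
    simp [PySem.Dict.keys_empty, PySem.Set.update_nil_left, hpairs, hcats,
      List.map_map, Function.comp_def]
  have hitems : dic.items = dic.keys.map (fun k => (k, dic.getD k [])) :=
    PySem.Dict.items_eq_map_keys dic hnodup []
  have hlen : ∀ k, (dic.getD k []).length = cats.count k := by
    intro k
    rw [hdicdef, PySem.Dict.getD_foldl_modify_append]
    simp only [PySem.Dict.getD_empty, List.nil_append, List.length_map]
    rw [hpairs, hcats, List.count_eq_length_filter]
    simp [List.filter_map, Function.comp_def]
  -- reduce A's loop
  rw [loopA_eq, hitems, List.foldl_map]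
  -- reduce B's loop: values of counter
  have hvals : (PySem.Dict.counter cats).values
      = (PySem.Set.ofList cats).map (fun k => (cats.count k : Int)) := by
    simp only [PySem.Dict.values, PySem.Dict.items_counter, List.map_map, Function.comp_def]
  rw [hvals, List.foldl_map]
  simp only [hlen, hkeys]
  ring
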